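-- pv_equiv track=rewrite | github.com/charleynas/nhl_hot_hand | hot_hand.py | saveLengthList
-- ===== SOURCE A (Python) =====
-- def saveLengthList(str):
--     saveStreak = []
--     count = 0
--     i = 0
--     for shot in str:
--         if shot == 's':
--             count += 1
--         else:
--             saveStreak.append(count)
--             count = 0
--     saveStreak.append(count)
--     return saveStreak
-- ===== SOURCE B (Python) =====
-- def saveLengthList(str):
--     segments = ''.join('s' if c == 's' else ' ' for c in str).split(' ')
--     return [len(seg) for seg in segments]
-- ===== Notes on version B (the rewrite author's own statement) =====
-- stated objective: simpler
-- what changed: Replaces the running-counter accumulator loop with a transform-then-split decomposition: map every non-'s' char to a sentinel, split on it, and return the segment lengths.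
import Mathlib
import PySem

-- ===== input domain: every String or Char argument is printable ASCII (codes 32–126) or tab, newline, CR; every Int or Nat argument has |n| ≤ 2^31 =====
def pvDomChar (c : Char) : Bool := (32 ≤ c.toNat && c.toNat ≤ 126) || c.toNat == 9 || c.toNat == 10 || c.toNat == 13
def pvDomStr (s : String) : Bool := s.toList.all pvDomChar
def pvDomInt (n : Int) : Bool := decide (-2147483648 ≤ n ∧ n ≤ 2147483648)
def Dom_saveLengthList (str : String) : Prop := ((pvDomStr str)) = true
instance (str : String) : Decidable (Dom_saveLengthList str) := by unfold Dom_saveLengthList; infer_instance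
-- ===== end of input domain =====

-- B replaces A's running-counter loop by a transform / split-on-sentinel / length-map decomposition (simpler; same cost).

-- ===== PORT A =====
def saveLengthList (str : String) : List Int :=
  let st := str.toList.foldl
    (fun (st : List Int × Int) shot =>
      if shot = 's' then (st.1, st.2 + 1) else (st.1 ++ [st.2], 0))
    ([], 0)
  st.1 ++ [st.2]

-- ===== PORT B =====
def saveLengthList_alt (str : String) : List Int :=
  let segments := PySem.Chars.splitOn (str.toList.map (fun c => if c = 's' then 's' else ' ')) [' ']
  segments.map (fun seg => (seg.length : Int))

-- ===== PRECONDITION & SPEC =====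
def Spec_saveLengthList (str : String) (out : List Int) : Prop := out = saveLengthList_alt str
instance (str : String) (out : List Int) : Decidable (Spec_saveLengthList str out) := by unfold Spec_saveLengthList; infer_instance

-- ===== CLAIM (what is proved, stated in full; the proofs are below) =====
def Claim_equal_saveLengthList : Prop := ∀ (str : String), Dom_saveLengthList str → Spec_saveLengthList str (saveLengthList str)

-- ===== LEMMAS AND PROOFS =====

-- Structural single-separator split used only in the proofs.
def mySplit (d : Char) (pre : List Char) : List Char → List (List Char)
  | [] => [pre]
  | c :: rest => if c = d then pre :: mySplit d [] rest else mySplit d (pre ++ [c]) rest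

theorem splitOn_go_eq (d : Char) :
    ∀ (fuel : Nat) (l cur : List Char) (acc : List (List Char)), l.length < fuel →
      PySem.Chars.splitOn.go [d] fuel l cur acc = acc.reverse ++ mySplit d cur.reverse l := by
  intro fuel
  induction fuel with
  | zero => intro l cur acc h; omega
  | succ n ih =>
    intro l cur acc h
    match l with
    | [] => simp [PySem.Chars.splitOn.go, mySplit]
    | c :: rest =>
      simp only [PySem.Chars.splitOn.go]
      by_cases hc : c = d
      · subst hc
        have hp : List.isPrefixOf [c] (c :: rest) = true := by simp [List.isPrefixOf]
        rw [if_pos hp]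
        have hd : List.drop (List.length [c]) (c :: rest) = rest := by simp
        rw [hd, ih rest [] (cur.reverse :: acc) (by simp at h; omega)]
        simp [mySplit]
      · have hp : List.isPrefixOf [d] (c :: rest) = false := by
          simp [List.isPrefixOf]
          intro hdc; exact absurd hdc.symm hc
        simp only [hp, Bool.false_eq_true, if_false]
        rw [ih rest (c :: cur) acc (by simp at h; omega)]
        simp [mySplit, hc]

theorem splitOn_eq_mySplit (d : Char) (l : List Char) :
    PySem.Chars.splitOn l [d] = mySplit d [] l := by
  unfold PySem.Chars.splitOn
  rw [splitOn_go_eq d (l.length + 1) l [] [] (by omega)]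
  simp

theorem foldl_eq_split :
    ∀ (cs : List Char) (acc : List Int) (k : Int) (pre : List Char), k = pre.length →
      (cs.foldl
        (fun (st : List Int × Int) shot =>
          if shot = 's' then (st.1, st.2 + 1) else (st.1 ++ [st.2], 0))
        (acc, k)).1 ++
      [(cs.foldl
        (fun (st : List Int × Int) shot =>
          if shot = 's' then (st.1, st.2 + 1) else (st.1 ++ [st.2], 0))
        (acc, k)).2] =
      acc ++ (mySplit ' ' pre (cs.map (fun c => if c = 's' then 's' else ' '))).map
        (fun seg => (seg.length : Int)) := by
  intro cs
  induction cs with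
  | nil => intro acc k pre hk; simp [mySplit, hk]
  | cons c rest ih =>
    intro acc k pre hk
    by_cases hc : c = 's'
    · subst hc
      simp only [List.foldl_cons, List.map_cons, if_true]
      rw [ih acc (k + 1) (pre ++ ['s']) (by simp [hk])]
      simp [mySplit]
    · simp only [List.foldl_cons, List.map_cons, hc, if_false]
      rw [ih (acc ++ [k]) 0 [] (by simp)]
      simp [mySplit, hk]

-- ===== VERDICT (by name: the statement is the Claim_ definition above) =====
theorem saveLengthList_spec : Claim_equal_saveLengthList := by
  intro str _
  unfold Spec_saveLengthList saveLengthList saveLengthList_alt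
  rw [splitOn_eq_mySplit]
  have := foldl_eq_split str.toList [] 0 [] (by simp)
  simpa using this
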